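-- pv_equiv track=rewrite | github.com/frozzway/DeclensionService | utils/casing_manager.py | apply_words_cases
-- ===== SOURCE A (Python) =====
-- from typing import Iterable
--
-- def apply_words_cases(words: Iterable[str], words_cases: list[list[bool]]) -> list[str]:
--     new_words = []
--     for w_idx, word in enumerate(words):
--         new_word = ""
--         word_cases = None
--         for (l_idx, letter) in enumerate(word):
--             if w_idx < len(words_cases):
--                 word_cases = words_cases[w_idx]
--             if word_cases and l_idx < len(word_cases):
--                 new_word += letter.lower() if word_cases[l_idx] else letter.upper()
--             else:
--                 new_word += letter
--         new_words.append(new_word)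
--     return new_words
-- ===== SOURCE B (Python) =====
-- def apply_words_cases(words, words_cases):
--     new_words = []
--     for w_idx, word in enumerate(words):
--         cases = words_cases[w_idx] if w_idx < len(words_cases) else None
--         if cases:
--             cased = ''.join(l.lower() if c else l.upper() for l, c in zip(word, cases))
--             new_words.append(cased + word[len(cases):])
--         else:
--             new_words.append(word)
--     return new_words
-- ===== Notes on version B (the rewrite author's own statement) =====
-- stated objective: simpler
-- what changed: Per word the flag list is fetched once and the cased prefix is built by zipping letters with flags plus a slice for the uncovered tail, instead of quadratic string concatenation with per-letter index-bound checks inside the letter loop.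
import Mathlib
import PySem

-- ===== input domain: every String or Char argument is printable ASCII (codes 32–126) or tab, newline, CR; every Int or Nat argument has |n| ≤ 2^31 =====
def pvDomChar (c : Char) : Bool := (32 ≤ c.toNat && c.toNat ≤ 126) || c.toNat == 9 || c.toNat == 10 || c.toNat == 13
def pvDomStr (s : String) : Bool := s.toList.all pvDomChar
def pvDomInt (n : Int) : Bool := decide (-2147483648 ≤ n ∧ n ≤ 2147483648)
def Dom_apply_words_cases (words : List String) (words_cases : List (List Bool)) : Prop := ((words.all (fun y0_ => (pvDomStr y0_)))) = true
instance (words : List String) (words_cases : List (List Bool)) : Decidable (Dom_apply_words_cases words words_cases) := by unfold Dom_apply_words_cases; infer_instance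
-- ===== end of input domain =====

-- B fetches each word's flag list once and builds the cased prefix by zipping letters with flags
-- plus a slice for the uncovered tail, replacing A's per-letter bound checks (objective: simpler).

-- ===== PORT A =====
-- body of A's inner letter loop ('if w_idx < len(words_cases): word_cases = …;
-- if word_cases and l_idx < len(word_cases): …'), as a named helper used by the port
def pvStepA (words_cases : List (List Bool)) (w_idx : Int)
    (st : List Char × Option (List Bool)) (lp : Int × Char) : List Char × Option (List Bool) :=
  let l_idx := lp.1
  let letter := lp.2
  let word_cases : Option (List Bool) :=
    if w_idx < (words_cases.length : Int) then
      some (PySem.List.pyGetD words_cases w_idx [])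
    else st.2
  let new_word :=
    match word_cases with
    | some cs =>
        if cs ≠ [] ∧ l_idx < (cs.length : Int) then
          st.1 ++ [if PySem.List.pyGetD cs l_idx false then
                     PySem.Chars.lowerChar letter
                   else PySem.Chars.upperChar letter]
        else st.1 ++ [letter]
    | none => st.1 ++ [letter]
  (new_word, word_cases)

def apply_words_cases (words : List String) (words_cases : List (List Bool)) : List String :=
  (PySem.List.enumerate words 0).foldl (fun (new_words : List String) wp =>
    let r := (PySem.List.enumerate wp.2.toList 0).foldl (pvStepA words_cases wp.1) ([], none)
    new_words ++ [String.ofList r.1]) []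

-- ===== PORT B =====
def altCased (word : List Char) (cases : List Bool) : List Char :=
  (word.zip cases).map (fun p => if p.2 then PySem.Chars.lowerChar p.1 else PySem.Chars.upperChar p.1)

def apply_words_cases_alt (words : List String) (words_cases : List (List Bool)) : List String :=
  (PySem.List.enumerate words 0).map (fun wp =>
    let cases : List Bool :=
      if wp.1 < (words_cases.length : Int) then PySem.List.pyGetD words_cases wp.1 [] else []
    if cases.isEmpty then wp.2
    else String.ofList
      (altCased wp.2.toList cases ++ PySem.List.slice wp.2.toList (some (cases.length : Int)) none))

-- ===== PRECONDITION & SPEC =====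
def Spec_apply_words_cases (words : List String) (words_cases : List (List Bool)) (out : List String) : Prop := out = apply_words_cases_alt words words_cases
instance (words : List String) (words_cases : List (List Bool)) (out : List String) : Decidable (Spec_apply_words_cases words words_cases out) := by unfold Spec_apply_words_cases; infer_instance

-- ===== CLAIM (what is proved, stated in full; the proofs are below) =====
def Claim_equal_apply_words_cases : Prop := ∀ (words : List String) (words_cases : List (List Bool)), Dom_apply_words_cases words words_cases → Spec_apply_words_cases words words_cases (apply_words_cases words words_cases)

-- ===== LEMMAS AND PROOFS =====

-- spec of A's inner letter loop with a fixed flag list cs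
def pvGo (cs : List Bool) : List Char → Int → List Char
  | [], _ => []
  | l :: ls, j =>
    (if cs ≠ [] ∧ j < (cs.length : Int) then
       [if PySem.List.pyGetD cs j false then PySem.Chars.lowerChar l else PySem.Chars.upperChar l]
     else [l]) ++ pvGo cs ls (j + 1)

lemma pvInner_in (words_cases : List (List Bool)) (w_idx : Int)
    (hin : w_idx < (words_cases.length : Int)) :
    ∀ (word : List Char) (j : Int) (acc : List Char) (w : Option (List Bool)),
      ((PySem.List.enumerate word j).foldl (pvStepA words_cases w_idx) (acc, w)).1
        = acc ++ pvGo (PySem.List.pyGetD words_cases w_idx []) word j := by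
  intro word
  induction word with
  | nil => intro j acc w; simp [PySem.List.enumerate_nil, pvGo]
  | cons l ls ih =>
    intro j acc w
    rw [PySem.List.enumerate_cons, List.foldl_cons, ih]
    simp only [pvStepA, pvGo, hin, if_pos]
    split_ifs <;> simp

lemma pvInner_out (words_cases : List (List Bool)) (w_idx : Int)
    (hout : ¬ w_idx < (words_cases.length : Int)) :
    ∀ (word : List Char) (j : Int) (acc : List Char),
      (PySem.List.enumerate word j).foldl (pvStepA words_cases w_idx) (acc, none)
        = (acc ++ word, none) := by
  intro word
  induction word with
  | nil => intro j acc; simp [PySem.List.enumerate_nil]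
  | cons l ls ih =>
    intro j acc
    rw [PySem.List.enumerate_cons, List.foldl_cons]
    have hstep : pvStepA words_cases w_idx (acc, none) (j, l) = (acc ++ [l], none) := by
      simp [pvStepA, hout]
    rw [hstep, ih (j + 1) (acc ++ [l])]
    simp

lemma pvGo_nil_cases (word : List Char) (j : Int) : pvGo [] word j = word := by
  induction word generalizing j with
  | nil => simp [pvGo]
  | cons l ls ih => simp [pvGo, ih]

lemma pvGo_eq_zip_drop (cs : List Bool) (word : List Char) (j : ℕ) :
    pvGo cs word (j : Int)
      = altCased word (cs.drop j) ++ word.drop (cs.length - j) := by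
  induction word generalizing j with
  | nil => simp [pvGo, altCased]
  | cons l ls ih =>
    by_cases hj : j < cs.length
    · have hd : cs.drop j = cs[j] :: cs.drop (j + 1) := List.drop_eq_getElem_cons hj
      have hsub : cs.length - j = (cs.length - (j + 1)) + 1 := by omega
      have hget : PySem.List.pyGetD cs (j : Int) false = cs[j] :=
        PySem.List.pyGetD_ofNat (xs := cs) j false hj
      have hcond : cs ≠ [] ∧ (j : Int) < (cs.length : Int) := by
        refine ⟨fun h => by simp [h] at hj, by exact_mod_cast hj⟩
      have hih := ih (j + 1)
      push_cast at hih
      simp only [pvGo, hcond, hget, hd, hsub, altCased, List.zip_cons_cons,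
        List.map_cons, List.drop_succ_cons, hih]
      simp [hcond.1]
    · have hd : cs.drop j = [] := List.drop_eq_nil_of_le (by omega)
      have hd1 : cs.drop (j + 1) = [] := List.drop_eq_nil_of_le (by omega)
      have hsub : cs.length - j = 0 := by omega
      have hsub1 : cs.length - (j + 1) = 0 := by omega
      have hcond : ¬ (cs ≠ [] ∧ (j : Int) < (cs.length : Int)) := by
        rintro ⟨-, h⟩
        have : j < cs.length := by exact_mod_cast h
        omega
      have hih := ih (j + 1)
      push_cast at hih
      simp only [pvGo, hcond, if_neg, not_false_iff, hd, hd1, hsub, hsub1, hih,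
        altCased, List.zip_nil_right, List.map_nil, List.nil_append, List.drop_zero]
      simp

-- per-word agreement between A's inner loop and B's per-word expression
lemma pvWord_eq (words_cases : List (List Bool)) (wp : Int × String) :
    String.ofList
        (((PySem.List.enumerate wp.2.toList 0).foldl (pvStepA words_cases wp.1) ([], none)).1)
      = (let cases : List Bool :=
           if wp.1 < (words_cases.length : Int) then PySem.List.pyGetD words_cases wp.1 [] else [];
         if cases.isEmpty then wp.2
         else String.ofList
           (altCased wp.2.toList cases ++ PySem.List.slice wp.2.toList (some (cases.length : Int)) none)) := by
  by_cases hin : wp.1 < (words_cases.length : Int)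
  · rw [pvInner_in words_cases wp.1 hin]
    set cs := PySem.List.pyGetD words_cases wp.1 [] with hcs
    simp only [hin, if_pos]
    by_cases hcsnil : cs.isEmpty
    · rw [List.isEmpty_iff] at hcsnil
      simp [hcsnil, pvGo_nil_cases]
    · rw [if_neg hcsnil]
      have h0 : (0 : Int) = ((0 : ℕ) : Int) := rfl
      rw [h0, pvGo_eq_zip_drop, PySem.List.slice_from_natCast]
      simp
  · have h := pvInner_out words_cases wp.1 hin wp.2.toList 0 []
    simp only [List.nil_append] at h
    rw [h]
    simp [hin]

-- ===== VERDICT (by name: the statement is the Claim_ definition above) =====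
theorem apply_words_cases_spec : Claim_equal_apply_words_cases := by
  intro words words_cases _
  unfold Spec_apply_words_cases apply_words_cases apply_words_cases_alt
  rw [PySem.List.foldl_append_singleton_eq_map]
  simp only [List.nil_append]
  apply List.map_congr_left
  intro wp _
  exact pvWord_eq words_cases wp
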